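-- pv_equiv track=rewrite | github.com/yanqinghao/recognizing-digits | python/utils/detection.py | check_high
-- ===== SOURCE A (Python) =====
-- def check_high(arraySlice, N=4, threshold=100):
--     numInRow = 0
--     maxInRow = 0
--     for x in arraySlice:
--         if (x >= threshold):
--             numInRow = numInRow + 1
--         else:
--             if numInRow > maxInRow:
--                 maxInRow = numInRow
--             numInRow = 0
--     if (maxInRow > N or numInRow > N):
--         return 1
--     else:
--         return 0
-- ===== SOURCE B (Python) =====
-- def check_high(arraySlice, N=4, threshold=100):
--     # Run-length encode the high/low pattern, then reduce over the high runs.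
--     runs = []
--     for x in arraySlice:
--         high = x >= threshold
--         if runs and runs[-1][0] == high:
--             k, n = runs[-1]
--             runs[-1] = (k, n + 1)
--         else:
--             runs.append((high, 1))
--     maxRun = max((n for k, n in runs if k), default=0)
--     return 1 if maxRun > N else 0
-- ===== Notes on version B (the rewrite author's own statement) =====
-- stated objective: alternative
-- what changed: Replaces the running-counter-plus-max loop with a group-then-reduce decomposition: build a run-length encoding of the high/low pattern, then take the max length over the high runs (default 0) and compare it with N.
import Mathlib
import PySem

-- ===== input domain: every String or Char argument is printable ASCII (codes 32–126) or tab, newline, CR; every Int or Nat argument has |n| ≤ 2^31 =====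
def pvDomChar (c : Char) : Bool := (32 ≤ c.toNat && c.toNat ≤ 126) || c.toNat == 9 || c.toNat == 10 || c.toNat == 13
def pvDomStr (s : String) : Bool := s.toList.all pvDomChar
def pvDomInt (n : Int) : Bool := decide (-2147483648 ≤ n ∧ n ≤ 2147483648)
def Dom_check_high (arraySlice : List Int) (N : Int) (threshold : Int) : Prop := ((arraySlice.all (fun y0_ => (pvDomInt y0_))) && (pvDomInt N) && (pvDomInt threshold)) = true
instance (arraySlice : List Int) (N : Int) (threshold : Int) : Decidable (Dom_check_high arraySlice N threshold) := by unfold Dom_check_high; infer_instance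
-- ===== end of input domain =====

-- B replaces A's running-counter-plus-max loop by a group-then-reduce decomposition
-- (run-length encode the high/low pattern, then max over the high-run lengths); same cost.

-- ===== PORT A =====
-- A's for-loop over the slice carrying (numInRow, maxInRow); structural recursion over the same state.
def check_high_loop (t : Int) : List Int → Int → Int → Int × Int
  | [], c, m => (c, m)
  | x :: rest, c, m =>
    if x ≥ t then check_high_loop t rest (c + 1) m
    else check_high_loop t rest 0 (if c > m then c else m)

def check_high (arraySlice : List Int) (N : Int) (threshold : Int) : Int :=
  if (check_high_loop threshold arraySlice 0 0).2 > N ∨ (check_high_loop threshold arraySlice 0 0).1 > N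
  then 1 else 0

-- ===== PORT B =====
-- Source B's run-building loop; the Python list with its mutable LAST element is represented
-- with the most recent run at the HEAD (hence the .reverse at the end to recover list order).
def check_high_step (t : Int) (acc : List (Bool × Int)) (x : Int) : List (Bool × Int) :=
  let high : Bool := decide (x ≥ t)
  match acc with
  | (k, n) :: tl => if k = high then (k, n + 1) :: tl else (high, 1) :: (k, n) :: tl
  | [] => [(high, 1)]

def check_high_alt (arraySlice : List Int) (N : Int) (threshold : Int) : Int :=
  if (((((arraySlice.foldl (check_high_step threshold) []).reverse).filter (·.1)).map (·.2)).foldl max 0) > N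
  then 1 else 0

-- ===== PRECONDITION & SPEC =====
def Spec_check_high (arraySlice : List Int) (N : Int) (threshold : Int) (out : Int) : Prop := out = check_high_alt arraySlice N threshold
instance (arraySlice : List Int) (N : Int) (threshold : Int) (out : Int) : Decidable (Spec_check_high arraySlice N threshold out) := by unfold Spec_check_high; infer_instance

-- ===== CLAIM (what is proved, stated in full; the proofs are below) =====
def Claim_equal_check_high : Prop := ∀ (arraySlice : List Int) (N : Int) (threshold : Int), Dom_check_high arraySlice N threshold → Spec_check_high arraySlice N threshold (check_high arraySlice N threshold)

-- ===== LEMMAS AND PROOFS =====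

-- max over the high-run lengths of a runs list
def grF (rs : List (Bool × Int)) : Int := ((rs.filter (·.1)).map (·.2)).foldl max 0

theorem foldl_max_pull (l : List Int) : ∀ (a x : Int),
    l.foldl max (max a x) = max (l.foldl max a) x := by
  induction l with
  | nil => intro a x; simp
  | cons y l ih =>
    intro a x
    simp only [List.foldl]
    rw [max_right_comm a x y, ih]

theorem le_foldl_max (l : List Int) : ∀ a : Int, a ≤ l.foldl max a := by
  induction l with
  | nil => intro a; simp
  | cons y l ih => intro a; exact le_trans (le_max_left a y) (ih _)

theorem grF_nonneg (rs : List (Bool × Int)) : 0 ≤ grF rs := le_foldl_max _ 0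

theorem grF_cons_true (n : Int) (tl : List (Bool × Int)) :
    grF ((true, n) :: tl) = max (grF tl) n := by
  simp only [grF, List.filter, List.map, List.foldl]
  exact foldl_max_pull _ 0 n

theorem grF_cons_false (n : Int) (tl : List (Bool × Int)) :
    grF ((false, n) :: tl) = grF tl := by
  simp [grF, List.filter]

theorem foldl_max_reverse (l : List Int) : ∀ a : Int,
    l.reverse.foldl max a = l.foldl max a := by
  induction l with
  | nil => intro a; simp
  | cons x l ih =>
    intro a
    simp only [List.reverse_cons, List.foldl_append, List.foldl, ih]
    rw [← foldl_max_pull]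

theorem grF_reverse (rs : List (Bool × Int)) : grF rs.reverse = grF rs := by
  simp only [grF, List.filter_reverse, List.map_reverse]
  exact foldl_max_reverse _ 0

-- current-run length as A sees it
def headTrue (acc : List (Bool × Int)) : Int :=
  match acc with
  | (true, n) :: _ => n
  | _ => 0

-- completed high runs as A's maxInRow sees them
def dropCurM (acc : List (Bool × Int)) : Int :=
  match acc with
  | (true, _) :: tl => grF tl
  | _ => grF acc

theorem main_inv (t : Int) : ∀ (xs : List Int) (c m : Int) (acc : List (Bool × Int)),
    0 ≤ c → 0 ≤ m → c = headTrue acc → m = dropCurM acc →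
    grF (xs.foldl (check_high_step t) acc)
      = max (check_high_loop t xs c m).2 (check_high_loop t xs c m).1 := by
  intro xs
  induction xs with
  | nil =>
    intro c m acc hc hm hc' hm'
    simp only [List.foldl, check_high_loop]
    match acc with
    | [] =>
      simp [headTrue, dropCurM, grF] at hc' hm'
      simp [hc', hm', grF]
    | (true, n) :: tl =>
      simp only [headTrue] at hc'
      simp only [dropCurM] at hm'
      rw [grF_cons_true, hc', hm']
    | (false, n) :: tl =>
      simp only [headTrue] at hc'
      simp only [dropCurM] at hm'
      rw [hc', hm', max_eq_left (grF_nonneg _)]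
  | cons x rest ih =>
    intro c m acc hc hm hc' hm'
    simp only [List.foldl, check_high_loop]
    by_cases hx : x ≥ t
    · have hd : decide (x ≥ t) = true := decide_eq_true hx
      rw [if_pos hx]
      match acc with
      | [] =>
        simp only [headTrue] at hc'
        simp only [dropCurM, grF, List.filter, List.map, List.foldl] at hm'
        have hstep : check_high_step t [] x = [(true, 1)] := by
          simp [check_high_step, hd]
        rw [hstep]
        refine ih (c + 1) m [(true, 1)] (by omega) hm (by simp [headTrue, hc']) ?_
        simp only [dropCurM, grF, List.filter, List.map, List.foldl]
        exact hm'
      | (true, n) :: tl =>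
        simp only [headTrue] at hc'
        simp only [dropCurM] at hm'
        have hstep : check_high_step t ((true, n) :: tl) x = (true, n + 1) :: tl := by
          simp [check_high_step, hd]
        rw [hstep]
        exact ih (c + 1) m ((true, n + 1) :: tl) (by omega) hm
          (by simp [headTrue]; omega) (by simpa [dropCurM] using hm')
      | (false, n) :: tl =>
        simp only [headTrue] at hc'
        simp only [dropCurM] at hm'
        have hstep : check_high_step t ((false, n) :: tl) x = (true, 1) :: (false, n) :: tl := by
          simp [check_high_step, hd]
        rw [hstep]
        exact ih (c + 1) m ((true, 1) :: (false, n) :: tl) (by omega) hm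
          (by simp [headTrue]; omega) (by simpa [dropCurM] using hm')
    · have hd : decide (x ≥ t) = false := decide_eq_false hx
      rw [if_neg hx]
      have hmax : (if c > m then c else m) = max m c := by
        rw [max_def]; split <;> split <;> omega
      rw [hmax]
      match acc with
      | [] =>
        simp only [headTrue] at hc'
        simp only [dropCurM, grF, List.filter, List.map, List.foldl] at hm'
        have hstep : check_high_step t [] x = [(false, 1)] := by
          simp [check_high_step, hd]
        rw [hstep]
        refine ih 0 (max m c) [(false, 1)] le_rfl (le_max_of_le_left hm) (by simp [headTrue]) ?_
        simp only [dropCurM, grF_cons_false]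
        simp only [grF, List.filter, List.map, List.foldl]
        subst hc' hm'; simp
      | (true, n) :: tl =>
        simp only [headTrue] at hc'
        simp only [dropCurM] at hm'
        have hstep : check_high_step t ((true, n) :: tl) x = (false, 1) :: (true, n) :: tl := by
          simp [check_high_step, hd]
        rw [hstep]
        refine ih 0 (max m c) ((false, 1) :: (true, n) :: tl) le_rfl (le_max_of_le_left hm)
          (by simp [headTrue]) ?_
        rw [show dropCurM ((false, 1) :: (true, n) :: tl) = grF ((false, 1) :: (true, n) :: tl) from rfl]
        rw [grF_cons_false, grF_cons_true, hm', hc']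
      | (false, n) :: tl =>
        simp only [headTrue] at hc'
        simp only [dropCurM, grF_cons_false] at hm'
        have hstep : check_high_step t ((false, n) :: tl) x = (false, n + 1) :: tl := by
          simp [check_high_step, hd]
        rw [hstep]
        refine ih 0 (max m c) ((false, n + 1) :: tl) le_rfl (le_max_of_le_left hm)
          (by simp [headTrue]) ?_
        rw [show dropCurM ((false, n + 1) :: tl) = grF ((false, n + 1) :: tl) from rfl]
        rw [grF_cons_false, hm', hc', max_eq_left (grF_nonneg _)]

-- ===== VERDICT (by name: the statement is the Claim_ definition above) =====
theorem check_high_spec : Claim_equal_check_high := by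
  intro xs N t _
  unfold Spec_check_high check_high check_high_alt
  have h2 : (((((xs.foldl (check_high_step t) []).reverse).filter (·.1)).map (·.2)).foldl max 0)
      = max (check_high_loop t xs 0 0).2 (check_high_loop t xs 0 0).1 := by
    rw [show (((((xs.foldl (check_high_step t) []).reverse).filter (·.1)).map (·.2)).foldl max 0)
        = grF ((xs.foldl (check_high_step t) []).reverse) from rfl, grF_reverse]
    exact main_inv t xs 0 0 [] le_rfl le_rfl (by simp [headTrue]) (by simp [dropCurM, grF])
  rw [h2]
  simp [gt_iff_lt]
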